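-- pv_equiv track=rewrite | github.com/alexandraback/datacollection | solutions_2692487_0/Python/LordDuran/q1.py | reduce_motes
-- ===== SOURCE A (Python) =====
-- def reduce_motes(our_mote, motes):
--     touched = True
--     while touched:
--         touched = False
--         for mote in motes:
--             if mote < our_mote:
--                 our_mote += mote
--                 motes.remove(mote)
--                 touched = True
--                 break
--     return our_mote, motes
-- ===== SOURCE B (Python) =====
-- def reduce_motes(our_mote, motes):
--     # Single forward scan with a kept-prefix; only a positive absorption can
--     # unlock previously kept motes, so only then do we rescan (note: unlike A,
--     # B does not mutate the `motes` list; return value is identical).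
--     cur = our_mote
--     kept = []          # scanned motes, each >= cur ever since it was kept
--     lst = motes
--     i = 0
--     while i < len(lst):
--         x = lst[i]
--         if x >= cur:
--             kept.append(x)
--             i += 1
--         elif x > 0:
--             cur += x
--             lst = kept + lst[i + 1:]   # growth may unlock kept motes: rescan
--             kept = []
--             i = 0
--         else:
--             cur += x                   # shrinking can never unlock kept motes
--             i += 1
--     return cur, kept
-- ===== Notes on version B (the rewrite author's own statement) =====
-- stated objective: alternative
-- what changed: Replaces A's restart-from-scratch scan after every absorption (with list.remove) by a single forward scan over a kept-prefix/pending split that rescans only after a positive absorption, since a non-positive absorption can never unlock an already-kept mote.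
import Mathlib
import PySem

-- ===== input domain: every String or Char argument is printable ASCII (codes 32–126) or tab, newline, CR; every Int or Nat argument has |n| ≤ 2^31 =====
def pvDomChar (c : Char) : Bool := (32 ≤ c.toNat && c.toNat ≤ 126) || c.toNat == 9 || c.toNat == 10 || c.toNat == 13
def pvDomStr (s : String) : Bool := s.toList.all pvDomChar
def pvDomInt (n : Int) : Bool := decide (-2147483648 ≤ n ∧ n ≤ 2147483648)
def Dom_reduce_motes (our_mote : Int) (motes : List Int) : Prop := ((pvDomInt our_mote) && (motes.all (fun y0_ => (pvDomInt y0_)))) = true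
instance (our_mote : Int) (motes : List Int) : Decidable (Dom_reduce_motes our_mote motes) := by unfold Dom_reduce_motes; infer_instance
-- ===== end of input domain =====

-- B replaces A's restart-from-scratch rescan after every absorption by a single forward
-- scan with a kept-prefix that is rescanned only after a positive absorption (alternative
-- structure; A mutates `motes` in place, B does not — the claim is about the return value).

-- ===== PORT A =====
-- inner `for mote in motes: if mote < our_mote: … break` — the first element < cur
def findFirstLt (cur : Int) : List Int → Option Int
  | [] => none
  | x :: xs => if x < cur then some x else findFirstLt cur xs

-- needed by loopA's termination proof
theorem findFirstLt_mem {cur m : Int} : ∀ {xs : List Int}, findFirstLt cur xs = some m → m ∈ xs := by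
  intro xs
  induction xs with
  | nil => intro h; cases h
  | cons x t ih =>
    intro h
    by_cases hx : x < cur
    · simp [findFirstLt, hx] at h; simp [h]
    · simp [findFirstLt, hx] at h; exact List.mem_cons_of_mem _ (ih h)

-- A's `while touched` loop: absorb the first mote < cur, `motes.remove(mote)`, restart
-- (`.getD motes` is a totality guard only: the found mote is a member, so remove? succeeds)
def loopA (cur : Int) (motes : List Int) : Int × List Int :=
  match hf : findFirstLt cur motes with
  | none => (cur, motes)
  | some m => loopA (cur + m) ((PySem.List.remove? motes m).getD motes)
termination_by motes.length
decreasing_by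
  have hm : m ∈ motes := findFirstLt_mem hf
  rw [PySem.List.remove?_eq_some_erase motes m hm]
  have := List.length_erase_of_mem hm
  have := List.length_pos_of_mem hm
  simp; omega

def reduce_motes (our_mote : Int) (motes : List Int) : Int × List Int :=
  loopA our_mote motes

-- ===== PORT B =====
-- Source B's scan state: `kept` = scanned motes (all ≥ cur), `pending` = lst[i:]
def loopB (cur : Int) (kept : List Int) (pending : List Int) : Int × List Int :=
  match pending with
  | [] => (cur, kept)
  | x :: rest =>
    if cur ≤ x then loopB cur (kept ++ [x]) rest
    else if 0 < x then loopB (cur + x) [] (kept ++ rest)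
    else loopB (cur + x) kept rest
termination_by (kept.length + pending.length, pending.length)
decreasing_by
  · simp; omega
  · simp; omega
  · simp; omega

def reduce_motes_alt (our_mote : Int) (motes : List Int) : Int × List Int :=
  loopB our_mote [] motes

-- ===== PRECONDITION & SPEC =====
def Spec_reduce_motes (our_mote : Int) (motes : List Int) (out : Int × List Int) : Prop :=
  out = reduce_motes_alt our_mote motes
instance (our_mote : Int) (motes : List Int) (out : Int × List Int) :
    Decidable (Spec_reduce_motes our_mote motes out) := by unfold Spec_reduce_motes; infer_instance

-- ===== CLAIM =====
def Claim_equal_reduce_motes : Prop :=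
  ∀ (our_mote : Int) (motes : List Int), Dom_reduce_motes our_mote motes →
    Spec_reduce_motes our_mote motes (reduce_motes our_mote motes)

-- ===== LEMMAS AND PROOFS =====
theorem loopA_none {cur : Int} {motes : List Int} (hf : findFirstLt cur motes = none) :
    loopA cur motes = (cur, motes) := by
  rw [loopA, hf]

theorem loopA_some {cur m : Int} {motes : List Int} (hf : findFirstLt cur motes = some m) :
    loopA cur motes = loopA (cur + m) ((PySem.List.remove? motes m).getD motes) := by
  rw [loopA, hf]

theorem findFirstLt_append_ge (cur : Int) (kept pending : List Int)
    (h : ∀ k ∈ kept, cur ≤ k) :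
    findFirstLt cur (kept ++ pending) = findFirstLt cur pending := by
  induction kept with
  | nil => simp
  | cons k ks ih =>
    have hk : cur ≤ k := h k (by simp)
    simp only [List.cons_append, findFirstLt, if_neg (by omega : ¬ k < cur)]
    exact ih (fun a ha => h a (by simp [ha]))

theorem remove?_append_ge (cur x : Int) (kept rest : List Int)
    (h : ∀ k ∈ kept, cur ≤ k) (hx : x < cur) :
    PySem.List.remove? (kept ++ x :: rest) x = some (kept ++ rest) := by
  induction kept with
  | nil => simp [PySem.List.remove?_cons_self]
  | cons k ks ih =>
    have hk : cur ≤ k := h k (by simp)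
    have hne : k ≠ x := by omega
    rw [List.cons_append, PySem.List.remove?_cons_of_ne _ hne,
      ih (fun a ha => h a (by simp [ha]))]
    rfl

theorem loopA_eq_loopB (cur : Int) (kept pending : List Int) :
    (∀ k ∈ kept, cur ≤ k) → loopA cur (kept ++ pending) = loopB cur kept pending := by
  induction cur, kept, pending using loopB.induct with
  | case1 cur kept =>
    intro h
    have hnone : findFirstLt cur kept = none := by
      have := findFirstLt_append_ge cur kept [] h
      simpa using this
    rw [loopB, List.append_nil, loopA_none hnone]
  | case2 cur kept x rest hx ih =>
    intro h
    rw [loopB, if_pos hx]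
    have heq : kept ++ x :: rest = (kept ++ [x]) ++ rest := by simp
    rw [heq]
    apply ih
    intro a ha
    rcases List.mem_append.1 ha with h1 | h1
    · exact h a h1
    · simp at h1; omega
  | case3 cur kept x rest hx hpos ih =>
    intro h
    have hxlt : x < cur := by omega
    have hfind : findFirstLt cur (kept ++ x :: rest) = some x := by
      rw [findFirstLt_append_ge cur kept _ h]; simp [findFirstLt, hxlt]
    rw [loopB, if_neg hx, if_pos hpos, loopA_some hfind,
      remove?_append_ge cur x kept rest h hxlt]
    have := ih (by intro a ha; simp at ha)
    simpa using this
  | case4 cur kept x rest hx hpos ih =>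
    intro h
    have hxlt : x < cur := by omega
    have hfind : findFirstLt cur (kept ++ x :: rest) = some x := by
      rw [findFirstLt_append_ge cur kept _ h]; simp [findFirstLt, hxlt]
    rw [loopB, if_neg hx, if_neg hpos, loopA_some hfind,
      remove?_append_ge cur x kept rest h hxlt]
    exact ih (by intro a ha; have := h a ha; omega)

-- ===== VERDICT =====
theorem reduce_motes_spec : Claim_equal_reduce_motes := by
  intro our_mote motes _
  unfold Spec_reduce_motes reduce_motes reduce_motes_alt
  have := loopA_eq_loopB our_mote [] motes (by simp)
  simpa using this
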